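-- pv_equiv track=rewrite | github.com/sunchendd/wings-accel | wings_engine_patch/wings_engine_patch/patch_vllm_container/v0_17_0/adaptive_draft_model_patch.py | trim_trailing_invalid_draft_tokens
-- ===== SOURCE A (Python) =====
-- def trim_trailing_invalid_draft_tokens(
--     draft_token_ids: list[list[int]],
-- ) -> list[list[int]]:
--     trimmed_rows: list[list[int]] = []
--     for row in draft_token_ids:
--         last_valid_index = -1
--         for index, token_id in enumerate(row):
--             if token_id >= 0:
--                 last_valid_index = index
--         trimmed_rows.append(row[: last_valid_index + 1] if last_valid_index >= 0 else [])
--     return trimmed_rows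
-- ===== SOURCE B (Python) =====
-- def trim_trailing_invalid_draft_tokens(
--     draft_token_ids: list[list[int]],
-- ) -> list[list[int]]:
--     trimmed_rows: list[list[int]] = []
--     for row in draft_token_ids:
--         for i in range(len(row) - 1, -1, -1):
--             if row[i] >= 0:
--                 trimmed_rows.append(row[:i + 1])
--                 break
--         else:
--             trimmed_rows.append([])
--     return trimmed_rows
-- ===== Notes on version B (the rewrite author's own statement) =====
-- stated objective: alternative
-- what changed: Replaces A's full forward scan that tracks the last valid index with a backward scan that stops (break) at the first valid token and slices there, using a for/else clause to emit an empty row when every token is negative.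
import Mathlib
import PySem

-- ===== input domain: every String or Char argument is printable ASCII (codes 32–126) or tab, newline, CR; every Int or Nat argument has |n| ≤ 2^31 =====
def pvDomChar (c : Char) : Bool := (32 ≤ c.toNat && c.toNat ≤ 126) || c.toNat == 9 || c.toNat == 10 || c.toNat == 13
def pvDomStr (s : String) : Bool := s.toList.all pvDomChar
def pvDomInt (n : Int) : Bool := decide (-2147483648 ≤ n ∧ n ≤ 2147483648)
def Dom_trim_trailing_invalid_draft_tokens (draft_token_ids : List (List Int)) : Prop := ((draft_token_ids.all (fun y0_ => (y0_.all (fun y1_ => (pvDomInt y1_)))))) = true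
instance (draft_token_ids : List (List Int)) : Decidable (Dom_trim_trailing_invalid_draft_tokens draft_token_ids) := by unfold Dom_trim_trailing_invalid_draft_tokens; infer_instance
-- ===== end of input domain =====

-- B replaces A's forward scan tracking the last valid index by a backward scan that breaks
-- at the first token >= 0 (objective: alternative decomposition; same worst-case cost).

-- ===== PORT A =====
-- the inner 'for index, token_id in enumerate(row): if token_id >= 0: last_valid_index = index'
def pvArowLast (row : List Int) : Int :=
  (PySem.List.enumerate row).foldl (fun acc p => if p.2 ≥ 0 then p.1 else acc) (-1)

def trim_trailing_invalid_draft_tokens (draft_token_ids : List (List Int)) : List (List Int) :=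
  draft_token_ids.foldl
    (fun trimmed_rows row =>
      let last_valid_index := pvArowLast row
      trimmed_rows ++
        [if last_valid_index ≥ 0 then PySem.List.slice row none (some (last_valid_index + 1)) else []])
    []

-- ===== PORT B =====
-- 'for i in range(len(row)-1, -1, -1): if row[i] >= 0: return row[:i+1] (break)' / else [].
-- row.getD n 0 is exact here: n < row.length at every call, so row[i] never raises.
def pvBrowGo (row : List Int) : Nat → List Int
  | 0 => []
  | n + 1 =>
    if row.getD n 0 ≥ 0 then PySem.List.slice row none (some ((n : Int) + 1))
    else pvBrowGo row n

def trim_trailing_invalid_draft_tokens_alt (draft_token_ids : List (List Int)) : List (List Int) :=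
  draft_token_ids.map (fun row => pvBrowGo row row.length)

-- ===== PRECONDITION & SPEC =====
def Spec_trim_trailing_invalid_draft_tokens (draft_token_ids : List (List Int)) (out : List (List Int)) : Prop := out = trim_trailing_invalid_draft_tokens_alt draft_token_ids
instance (draft_token_ids : List (List Int)) (out : List (List Int)) : Decidable (Spec_trim_trailing_invalid_draft_tokens draft_token_ids out) := by unfold Spec_trim_trailing_invalid_draft_tokens; infer_instance

-- ===== CLAIM (what is proved, stated in full; the proofs are below) =====
def Claim_equal_trim_trailing_invalid_draft_tokens : Prop := ∀ (draft_token_ids : List (List Int)), Dom_trim_trailing_invalid_draft_tokens draft_token_ids → Spec_trim_trailing_invalid_draft_tokens draft_token_ids (trim_trailing_invalid_draft_tokens draft_token_ids)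

-- ===== LEMMAS AND PROOFS =====

theorem pvArowLast_append (xs : List Int) (x : Int) :
    pvArowLast (xs ++ [x]) = if x ≥ 0 then (xs.length : Int) else pvArowLast xs := by
  simp [pvArowLast, PySem.List.enumerate_append, PySem.List.enumerate_cons]

theorem pvArowLast_lt (xs : List Int) : pvArowLast xs < (xs.length : Int) := by
  induction xs using List.reverseRecOn with
  | nil => simp [pvArowLast]
  | append_singleton ys y ih =>
    rw [pvArowLast_append]
    simp only [List.length_append, List.length_cons, List.length_nil]
    split <;> push_cast <;> omega

theorem pvBrowGo_frozen (xs : List Int) (x : Int) :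
    ∀ n, n ≤ xs.length → pvBrowGo (xs ++ [x]) n = pvBrowGo xs n := by
  intro n
  induction n with
  | zero => intro _; rfl
  | succ m ih =>
    intro h
    have hm : m < xs.length := by omega
    have hget : (xs ++ [x]).getD m 0 = xs.getD m 0 := by
      simp [List.getD, List.getElem?_append_left hm]
    unfold pvBrowGo
    rw [hget, ih (by omega)]
    split
    · rw [PySem.List.slice_to _ _]
      have : ((m : Int) + 1).toNat = m + 1 := by omega
      rw [this, PySem.List.slice_to _ _, this,
        List.take_append_of_le_length (by omega)]
      all_goals omega
    · rfl

theorem pvRow_eq (row : List Int) :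
    (if pvArowLast row ≥ 0 then PySem.List.slice row none (some (pvArowLast row + 1)) else []) =
      pvBrowGo row row.length := by
  induction row using List.reverseRecOn with
  | nil => simp [pvArowLast, pvBrowGo]
  | append_singleton ys y ih =>
    have hlen : (ys ++ [y]).length = ys.length + 1 := by simp
    rw [hlen]
    unfold pvBrowGo
    have hget : (ys ++ [y]).getD ys.length 0 = y := by
      simp [List.getD]
    rw [hget, pvArowLast_append]
    by_cases hy : y ≥ 0
    · simp [hy]
    · simp only [hy, if_false, pvBrowGo_frozen ys y ys.length le_rfl, ← ih]
      by_cases hl : pvArowLast ys ≥ 0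
      · have hlt := pvArowLast_lt ys
        simp only [hl, if_true]
        rw [PySem.List.slice_to _ _, PySem.List.slice_to _ _,
          List.take_append_of_le_length (by omega)]
        all_goals omega
      · simp [hl]

theorem trim_foldl_map (rows acc : List (List Int)) :
    rows.foldl
      (fun trimmed_rows row =>
        let last_valid_index := pvArowLast row
        trimmed_rows ++
          [if last_valid_index ≥ 0 then PySem.List.slice row none (some (last_valid_index + 1)) else []])
      acc = acc ++ rows.map (fun row => pvBrowGo row row.length) := by
  induction rows generalizing acc with
  | nil => simp
  | cons r rs ih => simp [List.foldl_cons, ih, pvRow_eq r]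

-- ===== VERDICT (by name: the statement is the Claim_ definition above) =====
theorem trim_trailing_invalid_draft_tokens_spec : Claim_equal_trim_trailing_invalid_draft_tokens := by
  intro xs _
  unfold Spec_trim_trailing_invalid_draft_tokens trim_trailing_invalid_draft_tokens
    trim_trailing_invalid_draft_tokens_alt
  simpa using trim_foldl_map xs []
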